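-- pv_equiv track=rewrite | github.com/pku-sixing/EMNLP2021-MSKE_Dialog | seq2seq/data_utils.py | restore_pointer_copy_example
-- ===== SOURCE A (Python) =====
-- def restore_pointer_copy_example(src, tgt, has_sos=True):
--         src = src.split()
--         tgt = tgt.split()
--         src_map = dict()
--         offset = 1 if has_sos else 0
--         for i, word in enumerate(src):
--             src_map['<src_%d>' % (i + offset)] = word
--         for i, word in enumerate(tgt):
--             tgt[i] = src_map.get(word, word)
--         return ' '.join(tgt)
-- ===== SOURCE B (Python) =====
-- def _resolve(t, words, offset):
--     # parse the token as a placeholder '<src_N>' (canonical decimal, no leading zeros)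
--     if len(t) < 7 or t[:5] != '<src_' or t[-1] != '>':
--         return t
--     mid = t[5:-1]
--     n = 0
--     for ch in mid:
--         if not ('0' <= ch <= '9'):
--             return t
--         n = n * 10 + (ord(ch) - 48)
--     if mid[0] == '0' and mid != '0':
--         return t
--     idx = n - offset
--     if 0 <= idx < len(words):
--         return words[idx]
--     return t
--
--
-- def restore_pointer_copy_example(src, tgt, has_sos=True):
--     words = src.split()
--     offset = 1 if has_sos else 0
--     out = []
--     for t in tgt.split():
--         out.append(_resolve(t, words, offset))
--     return ' '.join(out)
-- ===== Notes on version B (the rewrite author's own statement) =====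
-- stated objective: alternative
-- what changed: B builds no src_map at all: each target token is parsed directly as a placeholder '<src_N>' (exact prefix/suffix match, canonical decimal with no leading zeros) and, when N-offset indexes into the split source, replaced by that source word; otherwise left unchanged.
import Mathlib
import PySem

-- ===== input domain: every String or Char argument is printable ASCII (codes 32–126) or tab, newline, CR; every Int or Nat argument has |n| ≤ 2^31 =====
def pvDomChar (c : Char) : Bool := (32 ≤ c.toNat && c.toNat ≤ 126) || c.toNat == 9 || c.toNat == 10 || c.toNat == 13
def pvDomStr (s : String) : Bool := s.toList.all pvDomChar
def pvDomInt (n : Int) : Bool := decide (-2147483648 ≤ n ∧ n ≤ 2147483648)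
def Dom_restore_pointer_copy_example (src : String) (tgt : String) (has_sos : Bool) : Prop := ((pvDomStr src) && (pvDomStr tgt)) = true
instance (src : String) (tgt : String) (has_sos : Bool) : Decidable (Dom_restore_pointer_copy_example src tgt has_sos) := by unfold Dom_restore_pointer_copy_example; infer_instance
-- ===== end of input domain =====

-- B builds no src_map at all: each target token is parsed directly as a canonical '<src_N>'
-- placeholder and replaced by the (N-offset)'th source word when that index is in range — an
-- alternative decomposition (direct parse instead of a lookup table), same cost.

-- '<src_%d>' % n — the placeholder format string A builds
def pvKey (n : Int) : List Char := "<src_".toList ++ PySem.Int.toChars n ++ ['>']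

-- ===== PORT A =====
def restore_pointer_copy_example (src : String) (tgt : String) (has_sos : Bool) : String :=
  let srcL := PySem.Chars.split₀ src.toList
  let tgtL := PySem.Chars.split₀ tgt.toList
  let offset : Int := if has_sos then 1 else 0
  let srcMap : PySem.Dict (List Char) (List Char) :=
    (PySem.List.enumerate srcL 0).foldl (fun d p => d.insert (pvKey (p.1 + offset)) p.2) PySem.Dict.empty
  let tgtL' := (PySem.List.enumerate tgtL 0).foldl
    (fun l p => PySem.List.pySetD l p.1 (srcMap.getD p.2 p.2)) tgtL
  String.ofList (PySem.Chars.join [' '] tgtL')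

-- ===== PORT B =====
-- the 'for ch in mid' digit-accumulating loop of Source B (none = the early 'return t' on a non-digit)
def pvMidVal : List Char → Int → Option Int
  | [], n => some n
  | c :: rest, n =>
    if '0' ≤ c ∧ c ≤ '9' then pvMidVal rest (n * 10 + ((c.toNat : Int) - 48)) else none

-- Source B's _resolve helper
def pvResolve (t : List Char) (words : List (List Char)) (offset : Int) : List Char :=
  if t.length < 7 ∨ PySem.List.slice t (some 0) (some 5) ≠ "<src_".toList
      ∨ PySem.List.pyGet? t (-1) ≠ some '>' then t
  else
    let mid := PySem.List.slice t (some 5) (some (-1))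
    match pvMidVal mid 0 with
    | none => t
    | some n =>
      if PySem.List.pyGet? mid 0 = some '0' ∧ mid ≠ ['0'] then t
      else
        let idx := n - offset
        if 0 ≤ idx ∧ idx < (words.length : Int) then (PySem.List.pyGet? words idx).getD t  -- idx in range: words[idx]
        else t

def restore_pointer_copy_example_alt (src : String) (tgt : String) (has_sos : Bool) : String :=
  let words := PySem.Chars.split₀ src.toList
  let offset : Int := if has_sos then 1 else 0
  let out := (PySem.Chars.split₀ tgt.toList).foldl (fun acc t => acc ++ [pvResolve t words offset]) []
  String.ofList (PySem.Chars.join [' '] out)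

-- ===== PRECONDITION & SPEC =====
def Spec_restore_pointer_copy_example (src : String) (tgt : String) (has_sos : Bool) (out : String) : Prop := out = restore_pointer_copy_example_alt src tgt has_sos
instance (src : String) (tgt : String) (has_sos : Bool) (out : String) : Decidable (Spec_restore_pointer_copy_example src tgt has_sos out) := by unfold Spec_restore_pointer_copy_example; infer_instance

-- ===== CLAIM (what is proved, stated in full; the proofs are below) =====
def Claim_equal_restore_pointer_copy_example : Prop := ∀ (src : String) (tgt : String) (has_sos : Bool), Dom_restore_pointer_copy_example src tgt has_sos → Spec_restore_pointer_copy_example src tgt has_sos (restore_pointer_copy_example src tgt has_sos)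

-- ===== LEMMAS AND PROOFS =====

-- digit-character arithmetic
theorem pv_toDigits_ne_nil (n : Nat) : Nat.toDigits 10 n ≠ [] := by
  rw [Nat.toDigits_eq_if (by norm_num)]
  split_ifs <;> simp

theorem pv_digitChar_isDigit {d : Nat} (hd : d < 10) :
    '0' ≤ Nat.digitChar d ∧ Nat.digitChar d ≤ '9' := by
  interval_cases d <;> exact ⟨by decide, by decide⟩

theorem pv_digitChar_val {d : Nat} (hd : d < 10) : (Nat.digitChar d).toNat - 48 = d := by
  interval_cases d <;> decide

theorem pv_digit_toNat {c : Char} (h : '0' ≤ c ∧ c ≤ '9') : 48 ≤ c.toNat ∧ c.toNat ≤ 57 := by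
  obtain ⟨h1, h2⟩ := h
  exact ⟨h1, h2⟩

theorem pv_digitChar_of_digit {c : Char} (h : '0' ≤ c ∧ c ≤ '9') :
    Nat.digitChar (c.toNat - 48) = c := by
  obtain ⟨hl, hr⟩ := pv_digit_toNat h
  have hthis := Char.ofNat_toNat c
  interval_cases hc : c.toNat <;> (rw [← hthis]; decide)

theorem pv_char_eq_zero {c : Char} (h : c.toNat = 48) : c = '0' := by
  have hthis := Char.ofNat_toNat c
  rw [h] at hthis
  exact hthis.symm.trans (by decide)

-- Nat value of a digit list (the Source B accumulation loop, over Nat)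
def pvValN (acc : Nat) : List Char → Nat
  | [] => acc
  | c :: rest => pvValN (acc * 10 + (c.toNat - 48)) rest

theorem pvValN_singleton (a : Nat) (c : Char) : pvValN a [c] = a * 10 + (c.toNat - 48) := rfl

theorem pvValN_append (l1 l2 : List Char) : ∀ acc, pvValN acc (l1 ++ l2) = pvValN (pvValN acc l1) l2 := by
  induction l1 with
  | nil => intro acc; rfl
  | cons c t ih => intro acc; exact ih _

theorem pv_valN_ge (l : List Char) : ∀ acc, acc ≤ pvValN acc l := by
  induction l with
  | nil => intro acc; exact Nat.le_refl _
  | cons c rest ih => intro acc; exact le_trans (by omega) (ih _)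

theorem pvMidVal_digits : ∀ (l : List Char) (acc v : Int), pvMidVal l acc = some v →
    ∀ c ∈ l, '0' ≤ c ∧ c ≤ '9' := by
  intro l
  induction l with
  | nil => intro acc v _ c hc; simp at hc
  | cons c rest ih =>
    intro acc v h x hx
    simp only [pvMidVal] at h
    by_cases hc : '0' ≤ c ∧ c ≤ '9'
    · rw [if_pos hc] at h
      rcases List.mem_cons.mp hx with hx' | hx'
      · exact hx' ▸ hc
      · exact ih _ _ h x hx'
    · rw [if_neg hc] at h
      exact absurd h (by simp)

theorem pvMidVal_nat {l : List Char} (hd : ∀ c ∈ l, '0' ≤ c ∧ c ≤ '9') :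
    ∀ acc : Nat, pvMidVal l (acc : Int) = some ((pvValN acc l : Nat) : Int) := by
  induction l with
  | nil => intro acc; rfl
  | cons c rest ih =>
    intro acc
    have hc := hd c (by simp)
    have h48 := (pv_digit_toNat hc).1
    simp only [pvMidVal, if_pos hc]
    rw [show (acc : Int) * 10 + ((c.toNat : Int) - 48) = ((acc * 10 + (c.toNat - 48) : Nat) : Int) by omega]
    exact ih (fun x hx => hd x (by simp [hx])) _

-- value of toDigits
theorem pv_valN_toDigits (m : Nat) : ∀ acc, pvValN acc (Nat.toDigits 10 m)
    = acc * 10 ^ (Nat.toDigits 10 m).length + m := by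
  induction m using Nat.strong_induction_on with
  | _ m ih =>
    intro acc
    rw [Nat.toDigits_eq_if (by norm_num)]
    by_cases hm : m < 10
    · rw [if_pos hm]
      rw [pvValN_singleton, pv_digitChar_val hm]
      simp only [List.length_cons, List.length_nil, pow_one]
      norm_num
    · rw [if_neg hm]
      rw [pvValN_append, ih (m / 10) (by omega) acc, pvValN_singleton,
        pv_digitChar_val (Nat.mod_lt _ (by norm_num))]
      simp only [List.length_append, List.length_cons, List.length_nil, Nat.add_zero]
      rw [pow_succ, ← mul_assoc]
      generalize acc * 10 ^ (Nat.toDigits 10 (m / 10)).length = Q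
      omega

theorem pv_toDigits_digits (m : Nat) : ∀ c ∈ Nat.toDigits 10 m, '0' ≤ c ∧ c ≤ '9' := by
  induction m using Nat.strong_induction_on with
  | _ m ih =>
    rw [Nat.toDigits_eq_if (by norm_num)]
    by_cases hm : m < 10
    · rw [if_pos hm]
      intro c hc
      simp at hc
      exact hc ▸ pv_digitChar_isDigit hm
    · rw [if_neg hm]
      intro c hc
      rcases List.mem_append.mp hc with h | h
      · exact ih (m / 10) (by omega) c h
      · simp at h
        exact h ▸ pv_digitChar_isDigit (Nat.mod_lt _ (by norm_num))

theorem pv_toDigits_head_ne_zero {m : Nat} (hm : 1 ≤ m) :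
    ∀ c, (Nat.toDigits 10 m).head? = some c → c ≠ '0' := by
  induction m using Nat.strong_induction_on with
  | _ m ih =>
    intro c hc
    rw [Nat.toDigits_eq_if (by norm_num)] at hc
    by_cases hlt : m < 10
    · rw [if_pos hlt] at hc
      simp at hc
      subst hc
      interval_cases m <;> decide
    · rw [if_neg hlt] at hc
      rw [List.head?_append_of_ne_nil _ (pv_toDigits_ne_nil _)] at hc
      exact ih (m / 10) (by omega) (by omega) c hc

-- canonical digit strings round-trip: toDigits (pvValN 0 l) = l
theorem pv_toDigits_valN (l : List Char) (hne : l ≠ [])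
    (hdig : ∀ c ∈ l, '0' ≤ c ∧ c ≤ '9')
    (hlead : ∀ c, l.head? = some c → c = '0' → l = ['0']) :
    Nat.toDigits 10 (pvValN 0 l) = l := by
  induction l using List.reverseRecOn with
  | nil => exact absurd rfl hne
  | append_singleton d c ihd =>
    have hcdig : '0' ≤ c ∧ c ≤ '9' := hdig c (by simp)
    have hc48 := pv_digit_toNat hcdig
    rcases eq_or_ne d [] with hd | hd
    · subst hd
      simp only [List.nil_append]
      have hv : pvValN 0 [c] = c.toNat - 48 := by rw [pvValN_singleton]; omega
      rw [hv, Nat.toDigits_eq_if (by norm_num), if_pos (by omega), pv_digitChar_of_digit hcdig]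
    · have hdd : ∀ x ∈ d, '0' ≤ x ∧ x ≤ '9' := fun x hx => hdig x (by simp [hx])
      have hdlead : ∀ x, d.head? = some x → x ≠ '0' := by
        intro x hx h0
        have hx' : (d ++ [c]).head? = some x := by
          rw [List.head?_append_of_ne_nil _ hd]; exact hx
        have heq := hlead x hx' h0
        have h1 : 1 ≤ d.length := List.length_pos_iff.mpr hd
        have h2 := congrArg List.length heq
        rw [List.length_append] at h2
        simp only [List.length_cons, List.length_nil] at h2
        omega
      obtain ⟨h0, t, hdt⟩ : ∃ h0 t, d = h0 :: t := by
        cases d with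
        | nil => exact absurd rfl hd
        | cons a b => exact ⟨a, b, rfl⟩
      have hh0 : '0' ≤ h0 ∧ h0 ≤ '9' := hdd h0 (by simp [hdt])
      have hh048 := pv_digit_toNat hh0
      have hh0ne : h0 ≠ '0' := hdlead h0 (by simp [hdt])
      have hh0gt : 49 ≤ h0.toNat := by
        rcases Nat.lt_or_ge 48 h0.toNat with h | h
        · omega
        · exact absurd (pv_char_eq_zero (by omega)) hh0ne
      have hval1 : 1 ≤ pvValN 0 d := by
        rw [hdt]
        calc 1 ≤ h0.toNat - 48 := by omega
          _ = 0 * 10 + (h0.toNat - 48) := by omega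
          _ ≤ pvValN (0 * 10 + (h0.toNat - 48)) t := pv_valN_ge t _
          _ = pvValN 0 (h0 :: t) := rfl
      have hIH := ihd hd hdd (fun x hx h0x => absurd h0x (hdlead x hx))
      have hv : pvValN 0 (d ++ [c]) = (pvValN 0 d) * 10 + (c.toNat - 48) := by
        rw [pvValN_append, pvValN_singleton]
      rw [hv, Nat.toDigits_eq_if (by norm_num), if_neg (by omega)]
      have hdiv : (pvValN 0 d * 10 + (c.toNat - 48)) / 10 = pvValN 0 d := by omega
      have hmod : (pvValN 0 d * 10 + (c.toNat - 48)) % 10 = c.toNat - 48 := by omega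
      rw [hdiv, hmod, hIH, pv_digitChar_of_digit hcdig]

theorem pv_toChars_nonneg {n : Int} (hn : 0 ≤ n) :
    PySem.Int.toChars n = Nat.toDigits 10 n.toNat := by
  unfold PySem.Int.toChars
  rw [if_neg (by omega)]

-- slice bridges used by Source B's t[:5] and t[5:-1]
theorem pv_slice05 (xs : List Char) : PySem.List.slice xs (some 0) (some 5) = xs.take 5 := by
  simp [PySem.List.slice]

theorem pv_slice5neg1 (xs : List Char) (h : 7 ≤ xs.length) :
    PySem.List.slice xs (some 5) (some (-1)) = (xs.dropLast).drop 5 := by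
  simp [PySem.List.slice]
  rw [List.dropLast_eq_take, List.drop_take]
  rw [show min 5 xs.length = 5 by omega]

-- key injectivity
theorem pv_toDigits_inj (m : Nat) : ∀ n, Nat.toDigits 10 m = Nat.toDigits 10 n → m = n := by
  intro n h
  have h1 := pv_valN_toDigits m 0
  have h2 := pv_valN_toDigits n 0
  rw [h, h2] at h1
  omega

theorem pvKey_inj {m n : Int} (hm : 0 ≤ m) (hn : 0 ≤ n) (h : pvKey m = pvKey n) : m = n := by
  unfold pvKey at h
  rw [List.append_assoc, List.append_assoc, List.append_right_inj, List.append_left_inj] at h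
  rw [pv_toChars_nonneg hm, pv_toChars_nonneg hn] at h
  have := pv_toDigits_inj m.toNat n.toNat h
  omega

-- structure of pvKey n for n ≥ 0
theorem pvKey_len {n : Int} (hn : 0 ≤ n) : 7 ≤ (pvKey n).length := by
  unfold pvKey
  rw [pv_toChars_nonneg hn]
  have h := pv_toDigits_ne_nil n.toNat
  have : 1 ≤ (Nat.toDigits 10 n.toNat).length := List.length_pos_iff.mpr h
  simp [List.length_append]
  omega

-- how Source B's parser behaves on a genuine placeholder
theorem pv_parse_key {n : Int} (hn : 0 ≤ n) (words : List (List Char)) (offset : Int) :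
    pvResolve (pvKey n) words offset
      = if 0 ≤ n - offset ∧ n - offset < (words.length : Int)
        then (PySem.List.pyGet? words (n - offset)).getD (pvKey n)
        else pvKey n := by
  have hdl := pv_toChars_nonneg hn
  have hdlen : 1 ≤ (PySem.Int.toChars n).length := by
    rw [hdl]; exact List.length_pos_iff.mpr (pv_toDigits_ne_nil _)
  have hkey : pvKey n = "<src_".toList ++ PySem.Int.toChars n ++ ['>'] := rfl
  have hlen : 7 ≤ (pvKey n).length := pvKey_len hn
  have htake : PySem.List.slice (pvKey n) (some 0) (some 5) = "<src_".toList := by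
    rw [pv_slice05]
    show List.take ("<src_".toList).length ("<src_".toList ++ (PySem.Int.toChars n ++ ['>']))
      = "<src_".toList
    exact List.take_left
  have hassoc : "<src_".toList ++ PySem.Int.toChars n ++ ['>']
      = ("<src_".toList ++ PySem.Int.toChars n) ++ ['>'] := by rw [List.append_assoc]
  have hlast : PySem.List.pyGet? (pvKey n) (-1) = some '>' := by
    rw [hkey, hassoc]
    exact PySem.List.pyGet?_neg_one_append_singleton _ _
  have hmid : PySem.List.slice (pvKey n) (some 5) (some (-1)) = PySem.Int.toChars n := by
    rw [pv_slice5neg1 _ hlen, hkey, hassoc, List.dropLast_concat]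
    show List.drop ("<src_".toList).length ("<src_".toList ++ PySem.Int.toChars n)
      = PySem.Int.toChars n
    exact List.drop_left
  have hval : pvMidVal (PySem.Int.toChars n) 0 = some n := by
    rw [hdl, show (0 : Int) = ((0 : Nat) : Int) from rfl,
      pvMidVal_nat (pv_toDigits_digits n.toNat)]
    rw [pv_valN_toDigits]
    simp
    omega
  have hleadneg : ¬ (PySem.List.pyGet? (PySem.Int.toChars n) 0 = some '0'
      ∧ PySem.Int.toChars n ≠ ['0']) := by
    rw [hdl]
    rcases Nat.eq_zero_or_pos n.toNat with h0 | h1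
    · rw [h0]
      intro ⟨_, hne⟩
      exact hne (by decide)
    · intro ⟨hg, _⟩
      cases hc : Nat.toDigits 10 n.toNat with
      | nil => exact pv_toDigits_ne_nil _ hc
      | cons a t =>
        rw [hc, PySem.List.pyGet?_zero_cons] at hg
        have ha := pv_toDigits_head_ne_zero h1 a (by rw [hc]; rfl)
        exact ha (Option.some.injEq _ _ ▸ hg)
  unfold pvResolve
  rw [if_neg (by push_neg; exact ⟨by omega, htake, hlast⟩)]
  simp only [hmid, hval]
  rw [if_neg hleadneg]

-- the converse: any token Source B's parser accepts with value n IS the placeholder pvKey n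
theorem pv_parse_sound {t : List Char} {n : Int}
    (h7 : ¬ t.length < 7)
    (hpre : PySem.List.slice t (some 0) (some 5) = "<src_".toList)
    (hlast : PySem.List.pyGet? t (-1) = some '>')
    (hmid : pvMidVal (PySem.List.slice t (some 5) (some (-1))) 0 = some n)
    (hlead : ¬ (PySem.List.pyGet? (PySem.List.slice t (some 5) (some (-1))) 0 = some '0'
        ∧ PySem.List.slice t (some 5) (some (-1)) ≠ ['0'])) :
    t = pvKey n ∧ 0 ≤ n := by
  have hlen : 7 ≤ t.length := by omega
  have hne : t ≠ [] := by intro h; rw [h] at hlen; simp at hlen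
  set mid := PySem.List.slice t (some 5) (some (-1)) with hmiddef
  have hmid' : mid = (t.dropLast).drop 5 := by rw [hmiddef, pv_slice5neg1 _ hlen]
  -- t = prefix ++ mid ++ [last]
  have hlast' : t.getLast hne = '>' := by
    rw [PySem.List.pyGet?_neg_one, List.getLast?_eq_some_getLast hne] at hlast
    exact Option.some.injEq _ _ ▸ hlast
  have htake : t.take 5 = "<src_".toList := by rw [← pv_slice05, hpre]
  have htake' : (t.dropLast).take 5 = "<src_".toList := by
    rw [List.dropLast_eq_take, List.take_take, show min 5 (t.length - 1) = 5 by omega, htake]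
  have hdl1 : t.dropLast = "<src_".toList ++ mid := by
    rw [hmid', ← htake', List.take_append_drop]
  have hdecomp : t = "<src_".toList ++ mid ++ ['>'] := by
    conv_lhs => rw [← List.dropLast_concat_getLast hne]
    rw [hlast', hdl1, List.append_assoc]
  have hmidlen : 1 ≤ mid.length := by
    have hdll : (t.dropLast).length = t.length - 1 := List.length_dropLast
    rw [hmid', List.length_drop, hdll]
    omega
  have hmidne : mid ≠ [] := by
    intro h; rw [h] at hmidlen; simp at hmidlen
  -- digits, value, canonicity
  have hdig := pvMidVal_digits _ _ _ hmid
  have hvn : some n = some ((pvValN 0 mid : Nat) : Int) := by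
    rw [← hmid, show (0 : Int) = ((0 : Nat) : Int) from rfl, pvMidVal_nat hdig]
  have hn : n = ((pvValN 0 mid : Nat) : Int) := Option.some.injEq _ _ ▸ hvn
  have hleadc : ∀ c, mid.head? = some c → c = '0' → mid = ['0'] := by
    intro c hc h0
    by_contra hne'
    apply hlead
    refine ⟨?_, hne'⟩
    cases hm : mid with
    | nil => exact absurd hm hmidne
    | cons a rest =>
      rw [PySem.List.pyGet?_zero_cons]
      rw [hm] at hc
      simp at hc
      rw [hc, h0]
  have hround : Nat.toDigits 10 (pvValN 0 mid) = mid := pv_toDigits_valN mid hmidne hdig hleadc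
  constructor
  · rw [hdecomp]
    unfold pvKey
    rw [pv_toChars_nonneg (by omega : (0:Int) ≤ n), hn]
    simp only [Int.toNat_natCast]
    rw [hround]
  · omega

-- ===== A's dict lookup characterised as a first-match scan =====
def pvScan (offset : Int) (w : List Char) : List (Int × List Char) → List Char
  | [] => w
  | (i, word) :: rest => if w = pvKey (i + offset) then word else pvScan offset w rest

theorem pv_dict_fold_get? (offset : Int) (w : List Char) :
    ∀ (l : List (Int × List Char)) (d : PySem.Dict (List Char) (List Char)),
    ((l.foldl (fun d p => d.insert (pvKey (p.1 + offset)) p.2) d).get? w)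
      = l.foldl (fun r p => if w = pvKey (p.1 + offset) then some p.2 else r) (d.get? w) := by
  intro l
  induction l with
  | nil => intro d; rfl
  | cons p t ih =>
    intro d
    simp only [List.foldl_cons]
    rw [ih]
    congr 1
    rw [PySem.Dict.get?_insert]

theorem pv_fold_const (offset : Int) (w : List Char) :
    ∀ (l : List (Int × List Char)) (v : List Char),
    (∀ q ∈ l, w = pvKey (q.1 + offset) → q.2 = v) →
    l.foldl (fun r p => if w = pvKey (p.1 + offset) then some p.2 else r) (some v) = some v := by
  intro l
  induction l with
  | nil => intro v _; rfl
  | cons p t ih =>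
    intro v hv
    simp only [List.foldl_cons]
    by_cases hp : w = pvKey (p.1 + offset)
    · rw [if_pos hp, hv p (by simp) hp]
      exact ih v fun q hq hm => hv q (by simp [hq]) hm
    · rw [if_neg hp]
      exact ih v fun q hq hm => hv q (by simp [hq]) hm

theorem pv_scan_eq_fold (offset : Int) (w : List Char) :
    ∀ (l : List (Int × List Char)),
    (∀ p ∈ l, ∀ q ∈ l, w = pvKey (p.1 + offset) → w = pvKey (q.1 + offset) → p.2 = q.2) →
    pvScan offset w l
      = (l.foldl (fun r p => if w = pvKey (p.1 + offset) then some p.2 else r) none).getD w := by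
  intro l
  induction l with
  | nil => intro _; rfl
  | cons p t ih =>
    intro H
    simp only [List.foldl_cons, pvScan]
    by_cases hp : w = pvKey (p.1 + offset)
    · rw [if_pos hp, if_pos hp,
        pv_fold_const offset w t p.2
          (fun q hq hm => H q (by simp [hq]) p (by simp) hm hp)]
      rfl
    · rw [if_neg hp, if_neg hp]
      exact ih fun a ha b hb => H a (by simp [ha]) b (by simp [hb])

theorem pv_unique (offset : Int) (hoff : 0 ≤ offset) (w : List Char) (xs : List (List Char)) :
    ∀ p ∈ PySem.List.enumerate xs 0, ∀ q ∈ PySem.List.enumerate xs 0,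
      w = pvKey (p.1 + offset) → w = pvKey (q.1 + offset) → p.2 = q.2 := by
  intro p hp q hq hwp hwq
  rw [PySem.List.enumerate_eq_zipIdx_map] at hp hq
  simp only [List.mem_map] at hp hq
  obtain ⟨⟨a, i⟩, hai, hpe⟩ := hp
  obtain ⟨⟨b, j⟩, hbj, hqe⟩ := hq
  obtain ⟨_, hi2, hi3⟩ := List.mem_zipIdx hai
  obtain ⟨_, hj2, hj3⟩ := List.mem_zipIdx hbj
  subst hpe hqe
  simp only [zero_add] at hwp hwq ⊢
  have hij : (i : Int) = (j : Int) :=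
    add_right_cancel (pvKey_inj (by positivity) (by positivity) (hwp ▸ hwq))
  have : i = j := by exact_mod_cast hij
  subst this
  rw [hi3, hj3]

theorem pv_token_scan (offset : Int) (hoff : 0 ≤ offset) (xs : List (List Char)) (w : List Char) :
    ((PySem.List.enumerate xs 0).foldl
        (fun d p => d.insert (pvKey (p.1 + offset)) p.2)
        (PySem.Dict.empty : PySem.Dict (List Char) (List Char))).getD w w
      = pvScan offset w (PySem.List.enumerate xs 0) := by
  rw [PySem.Dict.getD_eq_get?_getD, pv_dict_fold_get?, PySem.Dict.get?_empty,
    pv_scan_eq_fold offset w _ (pv_unique offset hoff w xs)]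

-- pvScan finds exactly the pair whose key matches
theorem pv_scan_key (offset : Int) (hoff : 0 ≤ offset) :
    ∀ (xs : List (List Char)) (a i : Nat) (h : i < xs.length),
      pvScan offset (pvKey (((a + i : Nat) : Int) + offset)) (PySem.List.enumerate xs (a : Int))
        = xs[i] := by
  intro xs
  induction xs with
  | nil => intro a i h; simp at h
  | cons x t ih =>
    intro a i h
    rw [show PySem.List.enumerate (x :: t) (a : Int)
        = ((a : Int), x) :: PySem.List.enumerate t ((a : Int) + 1) from rfl]
    cases i with
    | zero =>
      simp only [pvScan, Nat.add_zero]
      simp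
    | succ j =>
      simp only [pvScan]
      rw [if_neg (by
        intro hk
        have := pvKey_inj (by positivity) (by positivity) hk
        have h2 : ((a + (j + 1) : Nat) : Int) = (a : Int) := by omega
        push_cast at h2
        omega)]
      have hcast1 : ((a + (j + 1) : Nat) : Int) = (((a + 1) + j : Nat) : Int) := by push_cast; ring
      have hcast2 : ((a : Int) + 1) = (((a + 1 : Nat)) : Int) := by push_cast; ring
      rw [hcast1, hcast2]
      have := ih (a + 1) j (by simpa using Nat.lt_of_succ_lt_succ h)
      rw [this]
      simp

theorem pv_scan_nokey (offset : Int) (w : List Char) :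
    ∀ (l : List (Int × List Char)), (∀ p ∈ l, w ≠ pvKey (p.1 + offset)) → pvScan offset w l = w := by
  intro l
  induction l with
  | nil => intro _; rfl
  | cons p t ih =>
    intro h
    obtain ⟨i, word⟩ := p
    simp only [pvScan]
    rw [if_neg (h (i, word) (by simp))]
    exact ih fun q hq => h q (by simp [hq])

-- Source B leaves a token unchanged when no source position's placeholder equals it
theorem pv_resolve_unmatched (offset : Int) (hoff : 0 ≤ offset) (xs : List (List Char)) (w : List Char)
    (h : ∀ i : Nat, i < xs.length → w ≠ pvKey ((i : Int) + offset)) :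
    pvResolve w xs offset = w := by
  unfold pvResolve
  by_cases h1 : (w.length < 7 ∨ PySem.List.slice w (some 0) (some 5) ≠ "<src_".toList
      ∨ PySem.List.pyGet? w (-1) ≠ some '>')
  · rw [if_pos h1]
  · rw [if_neg h1]
    push_neg at h1
    obtain ⟨h7, hpre, hlast⟩ := h1
    cases hmv : pvMidVal (PySem.List.slice w (some 5) (some (-1))) 0 with
    | none => simp only [hmv]
    | some n =>
      simp only [hmv]
      by_cases hld : (PySem.List.pyGet? (PySem.List.slice w (some 5) (some (-1))) 0 = some '0'
          ∧ PySem.List.slice w (some 5) (some (-1)) ≠ ['0'])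
      · rw [if_pos hld]
      · rw [if_neg hld]
        rw [if_neg (by
          intro ⟨hge, hlt⟩
          obtain ⟨hkey, hn0⟩ := pv_parse_sound (by omega) hpre hlast hmv hld
          have hi : ((n - offset).toNat : Int) = n - offset := Int.toNat_of_nonneg hge
          apply h (n - offset).toNat (by omega)
          rw [hkey]
          congr 1
          omega)]

-- A's token transform equals B's token transform
theorem pv_token (offset : Int) (hoff : 0 ≤ offset) (xs : List (List Char)) (w : List Char) :
    ((PySem.List.enumerate xs 0).foldl
        (fun d p => d.insert (pvKey (p.1 + offset)) p.2)
        (PySem.Dict.empty : PySem.Dict (List Char) (List Char))).getD w w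
      = pvResolve w xs offset := by
  rw [pv_token_scan offset hoff]
  by_cases hEx : ∃ i : Nat, i < xs.length ∧ w = pvKey ((i : Int) + offset)
  · obtain ⟨i, hi, hw⟩ := hEx
    subst hw
    have hscan := pv_scan_key offset hoff xs 0 i hi
    simp only [Nat.zero_add, Nat.cast_zero] at hscan
    rw [hscan]
    rw [pv_parse_key (by positivity) xs offset]
    rw [if_pos (by constructor <;> [omega; (push_cast; omega)])]
    rw [show (i : Int) + offset - offset = ((i : Nat) : Int) by ring]
    rw [PySem.List.pyGet?_natCast, List.getElem?_eq_getElem hi]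
    rfl
  · push_neg at hEx
    rw [pv_scan_nokey offset w _ (by
      intro p hp
      rw [PySem.List.enumerate_eq_zipIdx_map] at hp
      simp only [List.mem_map] at hp
      obtain ⟨⟨a, i⟩, hai, hpe⟩ := hp
      obtain ⟨_, hi2, _⟩ := List.mem_zipIdx hai
      subst hpe
      simp only [zero_add]
      exact hEx i (by omega))]
    rw [pv_resolve_unmatched offset hoff xs w hEx]

-- A's in-place write-back loop is a map over the original token list
theorem pv_set_loop (f : List Char → List Char) :
    ∀ (suf pre : List (List Char)),
    (PySem.List.enumerate suf (pre.length : Int)).foldl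
        (fun l p => PySem.List.pySetD l p.1 (f p.2)) (pre ++ suf)
      = pre ++ suf.map f := by
  intro suf
  induction suf with
  | nil => intro pre; simp [PySem.List.enumerate]
  | cons x t ih =>
    intro pre
    have hstep : PySem.List.pySetD (pre ++ x :: t) (pre.length : Int) (f x) = pre ++ f x :: t := by
      unfold PySem.List.pySetD PySem.List.pySet? PySem.List.pyIdx?
      rw [if_pos (by positivity), if_pos (by simp)]
      simp [List.set_append]
    have henum : PySem.List.enumerate (x :: t) (pre.length : Int)
        = ((pre.length : Int), x) :: PySem.List.enumerate t ((pre.length : Int) + 1) := rfl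
    rw [henum]
    simp only [List.foldl_cons, hstep]
    have hcast : ((pre ++ [f x]).length : Int) = (pre.length : Int) + 1 := by simp
    have := ih (pre ++ [f x])
    rw [hcast, List.append_assoc, List.singleton_append] at this
    rw [this]
    simp

-- ===== VERDICT (by name: the statement is the Claim_ definition above) =====
theorem restore_pointer_copy_example_spec : Claim_equal_restore_pointer_copy_example := by
  intro src tgt has_sos _
  unfold Spec_restore_pointer_copy_example
  unfold restore_pointer_copy_example restore_pointer_copy_example_alt
  simp only
  set srcL := PySem.Chars.split₀ src.toList with hsrcL
  set tgtL := PySem.Chars.split₀ tgt.toList with htgtL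
  set offset : Int := if has_sos then 1 else 0 with hoffdef
  have hoff : 0 ≤ offset := by rw [hoffdef]; split_ifs <;> norm_num
  have hA := pv_set_loop
    (fun w => ((PySem.List.enumerate srcL 0).foldl
        (fun d p => d.insert (pvKey (p.1 + offset)) p.2)
        (PySem.Dict.empty : PySem.Dict (List Char) (List Char))).getD w w) tgtL []
  simp only [List.nil_append, List.length_nil, Nat.cast_zero] at hA
  rw [hA, PySem.List.foldl_append_singleton_eq_map, List.nil_append]
  have hmap := List.map_congr_left (l := tgtL) fun w _ => pv_token offset hoff srcL w
  rw [hmap]
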